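-- pv_equiv track=rewrite | github.com/TheoGicquel/L3-IrisaParser | irisaparser/title/parse.py | parse_potential_titles
-- ===== SOURCE A (Python) =====
-- def parse_potential_titles(lines_input, potential_titles):
--     """
--     check extracted lines against found titles
--     if they both match, add the title to result array
--     """
--     lines = lines_input
--     res = []
--
--     for pot_title in potential_titles:
--         prev = ""
--
--         for line in lines:
--
--             raw_title = pot_title.replace(" ", "")
--             raw_line = line.replace(" ", "")
--
--             if raw_line == raw_title:
--                 res.append(line)
--
--             """
--             Try joining extracted text lines to form a title match
--             This is used to parse a title if a newline was present in a title.
--             """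
--             prev_raw_line = prev.replace(" ", "")
--             concat_prev = prev_raw_line + raw_line
--
--             if concat_prev == raw_title:
--                 res.append((prev + " " + line))
--
--             prev = line
--     return res
-- ===== SOURCE B (Python) =====
-- def parse_potential_titles(lines_input, potential_titles):
--     """
--     check extracted lines against found titles
--     if they both match, add the title to result array
--     """
--     index = {}
--     prev = ""
--     for line in lines_input:
--         raw = line.replace(" ", "")
--         index.setdefault(raw, []).append(line)
--         index.setdefault(prev.replace(" ", "") + raw, []).append(prev + " " + line)
--         prev = line
--     res = []
--     for pot_title in potential_titles:
--         res += index.get(pot_title.replace(" ", ""), [])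
--     return res
-- ===== Notes on version B (the rewrite author's own statement) =====
-- stated objective: faster
-- what changed: One pass over the lines builds a dict from each stripped line and stripped consecutive-pair concatenation to its matching output strings, so each title is a single hash lookup instead of rescanning all lines per title.
import Mathlib
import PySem

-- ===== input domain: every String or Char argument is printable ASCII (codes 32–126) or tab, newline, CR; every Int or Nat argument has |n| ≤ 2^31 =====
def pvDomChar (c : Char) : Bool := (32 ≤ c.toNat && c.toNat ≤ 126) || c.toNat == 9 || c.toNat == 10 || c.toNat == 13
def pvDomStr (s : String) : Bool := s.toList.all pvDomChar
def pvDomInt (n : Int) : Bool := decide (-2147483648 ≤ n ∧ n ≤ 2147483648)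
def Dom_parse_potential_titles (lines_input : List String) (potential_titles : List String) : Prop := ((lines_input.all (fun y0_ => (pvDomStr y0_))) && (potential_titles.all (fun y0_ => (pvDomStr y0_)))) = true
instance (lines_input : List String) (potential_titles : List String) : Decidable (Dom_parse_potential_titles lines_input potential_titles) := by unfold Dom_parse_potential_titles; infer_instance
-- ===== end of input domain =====

-- B replaces A's per-title rescan of all lines by a dict built in one pass over the lines
-- (stripped line / stripped pair-concatenation -> matching output strings), one lookup per title: faster.


-- ===== PORT A =====
def parse_potential_titles (lines_input : List String) (potential_titles : List String) : List String :=
  potential_titles.foldl (fun res pot_title =>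
    (lines_input.foldl (fun (st : List String × String) line =>
      let raw_title := PySem.Str.replace pot_title " " ""
      let raw_line := PySem.Str.replace line " " ""
      let res1 := if raw_line == raw_title then st.1 ++ [line] else st.1
      let prev_raw_line := PySem.Str.replace st.2 " " ""
      let concat_prev := prev_raw_line ++ raw_line
      let res2 := if concat_prev == raw_title then res1 ++ [st.2 ++ " " ++ line] else res1
      (res2, line)) (res, "")).1) []

-- ===== PORT B =====
def parse_potential_titles_alt (lines_input : List String) (potential_titles : List String) : List String :=
  let idx := (lines_input.foldl (fun (st : PySem.Dict String (List String) × String) line =>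
      let raw := PySem.Str.replace line " " ""
      let d1 := st.1.modify raw [] (· ++ [line])
      let d2 := d1.modify (PySem.Str.replace st.2 " " "" ++ raw) [] (· ++ [st.2 ++ " " ++ line])
      (d2, line)) (PySem.Dict.empty, "")).1
  potential_titles.foldl (fun res pot_title =>
    res ++ idx.getD (PySem.Str.replace pot_title " " "") []) []

-- ===== PRECONDITION & SPEC =====
def Spec_parse_potential_titles (lines_input : List String) (potential_titles : List String) (out : List String) : Prop := out = parse_potential_titles_alt lines_input potential_titles
instance (lines_input : List String) (potential_titles : List String) (out : List String) : Decidable (Spec_parse_potential_titles lines_input potential_titles out) := by unfold Spec_parse_potential_titles; infer_instance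

-- ===== CLAIM (what is proved, stated in full; the proofs are below) =====
def Claim_equal_parse_potential_titles : Prop := ∀ (lines_input : List String) (potential_titles : List String), Dom_parse_potential_titles lines_input potential_titles → Spec_parse_potential_titles lines_input potential_titles (parse_potential_titles lines_input potential_titles)

-- ===== LEMMAS AND PROOFS =====

/-- Proof-side event list: for each line, the (key, output) pair from the single-line
match and from the previous-line concatenation match, in A's append order. -/
def pvEvents (prev : String) : List String → List (String × String)
  | [] => []
  | line :: rest =>
      let raw := PySem.Str.replace line " " ""
      (raw, line) :: (PySem.Str.replace prev " " "" ++ raw, prev ++ " " ++ line) :: pvEvents line rest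

/-- B's dict-building fold is the plain modify-fold over the event list. -/
theorem pvDict_eq_events (lines : List String) (prev : String)
    (d : PySem.Dict String (List String)) :
    (lines.foldl (fun (st : PySem.Dict String (List String) × String) line =>
      let raw := PySem.Str.replace line " " ""
      let d1 := st.1.modify raw [] (· ++ [line])
      let d2 := d1.modify (PySem.Str.replace st.2 " " "" ++ raw) [] (· ++ [st.2 ++ " " ++ line])
      (d2, line)) (d, prev)).1
    = (pvEvents prev lines).foldl (fun d p => d.modify p.1 [] (· ++ [p.2])) d := by
  induction lines generalizing prev d with
  | nil => rfl
  | cons line rest ih => simp [pvEvents, ih]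

/-- A's inner loop over the lines appends exactly the outputs of the events whose key
is the stripped title. -/
theorem pvInner_eq_events (lines : List String) (key prev : String) (res : List String) :
    (lines.foldl (fun (st : List String × String) line =>
      let raw_line := PySem.Str.replace line " " ""
      let res1 := if raw_line == key then st.1 ++ [line] else st.1
      let res2 := if PySem.Str.replace st.2 " " "" ++ raw_line == key then
          res1 ++ [st.2 ++ " " ++ line] else res1
      (res2, line)) (res, prev)).1
    = res ++ ((pvEvents prev lines).filter (fun p => p.1 == key)).map (·.2) := by
  induction lines generalizing prev res with
  | nil => simp [pvEvents]
  | cons line rest ih =>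
      simp only [List.foldl_cons, ih, pvEvents, List.filter_cons]
      by_cases h1 : PySem.Str.replace line " " "" == key <;>
        by_cases h2 : PySem.Str.replace prev " " "" ++ PySem.Str.replace line " " "" == key <;>
          simp [h1, h2]

/-- Lookup in the dict built from the event list = filter the event list. -/
theorem pvLookup (events : List (String × String)) (key : String) :
    (events.foldl (fun d p => d.modify p.1 [] (· ++ [p.2]))
      (PySem.Dict.empty : PySem.Dict String (List String))).getD key []
    = (events.filter (fun p => p.1 == key)).map (·.2) := by
  rw [PySem.Dict.getD_foldl_modify_append]
  simp [PySem.Dict.empty, PySem.Dict.getD, PySem.Dict.get?]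

-- ===== VERDICT (by name: the statement is the Claim_ definition above) =====
theorem parse_potential_titles_spec : Claim_equal_parse_potential_titles := by
  intro lines_input potential_titles hdom
  clear hdom
  unfold Spec_parse_potential_titles parse_potential_titles parse_potential_titles_alt
  rw [pvDict_eq_events]
  induction potential_titles using List.reverseRecOn with
  | nil => rfl
  | append_singleton ts t ih =>
      simp only [List.foldl_append, List.foldl_cons, List.foldl_nil] at *
      rw [ih, pvInner_eq_events, pvLookup]
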